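-- pv_equiv track=rewrite | github.com/ArnaudGuibert/BlindMaze | src/core.py | decompose_path
-- ===== SOURCE A (Python) =====
-- def decompose_path(path):
--     # init
--     forward, turns = 0, 0
--     dx, dy = None, None
--
--     for curr, next in zip(path, path[1:]):
--         x1, y1 = curr[0], curr[1]
--         x2, y2 = next[0], next[1]
--
--         dx_new = x2 - x1
--         dy_new = y2 - y1
--
--         forward += 1
--         if dx is not None:
--             comp = 1 - (dx_new * dx + dy_new * dy)
--             turns += comp
--
--         dx = dx_new
--         dy = dy_new
--
--     # forward / turns
--     return forward, turns
-- ===== SOURCE B (Python) =====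
-- def decompose_path(path):
--     # Two-pass decomposition: build the per-segment direction table first,
--     # then fold turn amounts over adjacent delta pairs.
--     deltas = [(b[0] - a[0], b[1] - a[1]) for a, b in zip(path, path[1:])]
--     forward = len(deltas)
--     turns = sum(1 - (a[0] * b[0] + a[1] * b[1]) for a, b in zip(deltas, deltas[1:]))
--     return forward, turns
-- ===== Notes on version B (the rewrite author's own statement) =====
-- stated objective: alternative
-- what changed: Replaced the fused single loop carrying (forward, turns, previous-delta) state with two passes: first materialise the list of per-segment deltas, then sum turn amounts over adjacent delta pairs; forward is the table's length.
import Mathlib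
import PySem

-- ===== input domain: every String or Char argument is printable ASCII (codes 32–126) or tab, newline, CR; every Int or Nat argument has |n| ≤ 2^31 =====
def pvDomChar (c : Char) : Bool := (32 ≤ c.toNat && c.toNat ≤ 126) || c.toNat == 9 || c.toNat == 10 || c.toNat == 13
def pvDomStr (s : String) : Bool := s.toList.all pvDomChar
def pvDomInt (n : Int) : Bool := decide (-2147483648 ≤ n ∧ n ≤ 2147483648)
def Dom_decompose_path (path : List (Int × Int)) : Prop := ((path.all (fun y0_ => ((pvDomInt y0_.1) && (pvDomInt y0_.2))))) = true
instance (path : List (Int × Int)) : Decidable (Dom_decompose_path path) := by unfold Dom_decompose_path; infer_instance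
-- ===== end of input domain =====

-- B replaces A's fused single loop by a two-pass decomposition (delta table, then turn sum); alternative structure, same cost.


-- ===== PORT A =====
-- Fused loop over zip(path, path[1:]) carrying (forward, turns, previous delta or None).
def decompose_path (path : List (Int × Int)) : Int × Int :=
  let s := (path.zip path.tail).foldl
    (fun (st : Int × Int × Option (Int × Int)) cn =>
      let x1 := cn.1.1; let y1 := cn.1.2
      let x2 := cn.2.1; let y2 := cn.2.2
      let dx_new := x2 - x1
      let dy_new := y2 - y1
      let forward := st.1 + 1
      let turns := match st.2.2 with
        | none => st.2.1
        | some d => st.2.1 + (1 - (dx_new * d.1 + dy_new * d.2))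
      (forward, turns, some (dx_new, dy_new)))
    (0, 0, none)
  (s.1, s.2.1)

-- ===== PORT B =====
-- Two passes: build the delta table, then sum turn amounts over adjacent delta pairs.
def decompose_path_alt (path : List (Int × Int)) : Int × Int :=
  let deltas := (path.zip path.tail).map (fun ab => (ab.2.1 - ab.1.1, ab.2.2 - ab.1.2))
  let forward : Int := deltas.length
  let turns := ((deltas.zip deltas.tail).map
    (fun ab => 1 - (ab.1.1 * ab.2.1 + ab.1.2 * ab.2.2))).sum
  (forward, turns)

-- ===== PRECONDITION & SPEC =====
def Spec_decompose_path (path : List (Int × Int)) (out : Int × Int) : Prop := out = decompose_path_alt path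
instance (path : List (Int × Int)) (out : Int × Int) : Decidable (Spec_decompose_path path out) := by unfold Spec_decompose_path; infer_instance

-- ===== CLAIM (what is proved, stated in full; the proofs are below) =====
def Claim_equal_decompose_path : Prop := ∀ (path : List (Int × Int)), Dom_decompose_path path → Spec_decompose_path path (decompose_path path)

-- ===== LEMMAS AND PROOFS =====

-- turn sum over a delta list given the previous delta d
def pvT (d : Int × Int) : List (Int × Int) → Int
  | [] => 0
  | e :: ds => (1 - (e.1 * d.1 + e.2 * d.2)) + pvT e ds

def pvStep (st : Int × Int × Option (Int × Int)) (dn : Int × Int) : Int × Int × Option (Int × Int) :=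
  (st.1 + 1,
   (match st.2.2 with
    | none => st.2.1
    | some d => st.2.1 + (1 - (dn.1 * d.1 + dn.2 * d.2))),
   some dn)

theorem pvFold_some (ds : List (Int × Int)) : ∀ (f t : Int) (d : Int × Int),
    (ds.foldl pvStep (f, t, some d)).1 = f + ds.length ∧
    (ds.foldl pvStep (f, t, some d)).2.1 = t + pvT d ds := by
  induction ds with
  | nil => intro f t d; simp [pvT]
  | cons e ds ih =>
      intro f t d
      simp only [List.foldl_cons, pvStep, pvT]
      obtain ⟨h1, h2⟩ := ih (f + 1) (t + (1 - (e.1 * d.1 + e.2 * d.2))) e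
      constructor
      · rw [h1]; simp; ring
      · rw [h2]; ring

theorem pvB_sum (ds : List (Int × Int)) : ∀ (d : Int × Int),
    (((d :: ds).zip ds).map (fun ab => 1 - (ab.1.1 * ab.2.1 + ab.1.2 * ab.2.2))).sum = pvT d ds := by
  induction ds with
  | nil => intro d; simp [pvT]
  | cons e ds ih =>
      intro d
      simp only [List.zip_cons_cons, List.map_cons, List.sum_cons, pvT, ih e]
      ring

-- ===== VERDICT (by name: the statement is the Claim_ definition above) =====
theorem pvA_fold (path : List (Int × Int)) :
    decompose_path path =
      (let r := (path.zip path.tail).foldl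
        (fun st (cn : (Int × Int) × (Int × Int)) => pvStep st (cn.2.1 - cn.1.1, cn.2.2 - cn.1.2)) (0, 0, none);
       (r.1, r.2.1)) := rfl

theorem decompose_path_spec : Claim_equal_decompose_path := by
  intro path _
  unfold Spec_decompose_path
  rw [pvA_fold, ← List.foldl_map]
  unfold decompose_path_alt
  cases hds : (path.zip path.tail).map (fun ab => (ab.2.1 - ab.1.1, ab.2.2 - ab.1.2)) with
    | nil => simp [pvStep]
    | cons d ds =>
        simp only [List.foldl_cons, pvStep]
        norm_num
        obtain ⟨h1, h2⟩ := pvFold_some ds 1 0 d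
        simp only [h1, h2, List.tail_cons, pvB_sum ds d, List.length_cons]
        constructor
        · push_cast; ring
        · ring
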